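-- pv_equiv track=rewrite | github.com/gratejames/Ghost | Assembler/assembler.py | prettyOrList
-- ===== SOURCE A (Python) =====
-- def prettyOrList(listOfWords):
-- 	# ['a']				=> "a"
-- 	# ['a', 'b']		=> "a or c"
-- 	# ['a', 'b', 'c']	=> "a, b, or c"
-- 	if len(listOfWords) == 0:
-- 		return ""
-- 	elif len(listOfWords) == 1:
-- 		return str(listOfWords[0])
-- 	elif len(listOfWords) == 2:
-- 		return str(listOfWords[0]) + " or " + str(listOfWords[1])
-- 	else:
-- 		outString = ""
-- 		for wordNum, word in enumerate(listOfWords):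
-- 			if wordNum == len(listOfWords) - 1:
-- 				outString += ("or " + word)
-- 				break
-- 			outString += (word + ", ")
-- 		return outString
-- ===== SOURCE B (Python) =====
-- def prettyOrList(listOfWords):
--     if len(listOfWords) == 0:
--         return ""
--     if len(listOfWords) == 1:
--         return str(listOfWords[0])
--     if len(listOfWords) == 2:
--         return str(listOfWords[0]) + " or " + str(listOfWords[1])
--     # build back-to-front: start with the final "or <last>" and prepend
--     # each earlier word, scanning the prefix right-to-left
--     out = "or " + listOfWords[-1]
--     for word in reversed(listOfWords[:-1]):
--         out = word + ", " + out
--     return out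
-- ===== Notes on version B (the rewrite author's own statement) =====
-- stated objective: alternative
-- what changed: The length>=3 result is built back-to-front: B starts from 'or <last>' and prepends each earlier word while scanning the prefix right-to-left, instead of A's left-to-right enumerate/accumulator loop with a break; the repeated prepend trades speed for this construction (quadratic copying on very long lists).
import Mathlib
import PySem

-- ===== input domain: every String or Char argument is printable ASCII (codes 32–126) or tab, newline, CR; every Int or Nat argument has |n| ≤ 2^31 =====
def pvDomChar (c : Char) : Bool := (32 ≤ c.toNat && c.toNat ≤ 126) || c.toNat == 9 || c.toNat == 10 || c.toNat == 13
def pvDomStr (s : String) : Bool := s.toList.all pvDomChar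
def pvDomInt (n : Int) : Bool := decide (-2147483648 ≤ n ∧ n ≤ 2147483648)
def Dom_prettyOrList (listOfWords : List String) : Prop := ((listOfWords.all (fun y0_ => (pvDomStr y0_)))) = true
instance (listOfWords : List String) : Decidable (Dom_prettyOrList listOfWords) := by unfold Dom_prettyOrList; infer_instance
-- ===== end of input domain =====

-- B builds the length >= 3 result back-to-front (prepend while scanning right-to-left) instead of A's left-to-right accumulator loop; objective: alternative.


-- ===== PORT A =====
-- the 'for wordNum, word in enumerate(...)' loop with its break, carrying (index, remaining words, outString)
def prettyOrListLoop (n : Nat) : Nat → List String → String → String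
  | _, [], acc => acc
  | i, w :: rest, acc =>
    if i = n - 1 then acc ++ ("or " ++ w)
    else prettyOrListLoop n (i + 1) rest (acc ++ (w ++ ", "))

def prettyOrList (listOfWords : List String) : String :=
  if listOfWords.length = 0 then ""
  else if listOfWords.length = 1 then (PySem.List.pyGet? listOfWords 0).getD ""
  else if listOfWords.length = 2 then
    (PySem.List.pyGet? listOfWords 0).getD "" ++ " or " ++ (PySem.List.pyGet? listOfWords 1).getD ""
  else prettyOrListLoop listOfWords.length 0 listOfWords ""

-- ===== PORT B =====
-- 'for word in reversed(listOfWords[:-1]): out = word + ", " + out'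
def prettyOrList_alt (listOfWords : List String) : String :=
  if listOfWords.length = 0 then ""
  else if listOfWords.length = 1 then (PySem.List.pyGet? listOfWords 0).getD ""
  else if listOfWords.length = 2 then
    (PySem.List.pyGet? listOfWords 0).getD "" ++ " or " ++ (PySem.List.pyGet? listOfWords 1).getD ""
  else
    ((PySem.List.slice listOfWords none (some (-1))).reverse).foldl
      (fun out word => word ++ ", " ++ out)
      ("or " ++ (PySem.List.pyGet? listOfWords (-1)).getD "")

-- ===== PRECONDITION & SPEC =====
def Spec_prettyOrList (listOfWords : List String) (out : String) : Prop := out = prettyOrList_alt listOfWords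
instance (listOfWords : List String) (out : String) : Decidable (Spec_prettyOrList listOfWords out) := by unfold Spec_prettyOrList; infer_instance

-- ===== CLAIM (what is proved, stated in full; the proofs are below) =====
def Claim_equal_prettyOrList : Prop := ∀ (listOfWords : List String), Dom_prettyOrList listOfWords → Spec_prettyOrList listOfWords (prettyOrList listOfWords)

-- ===== LEMMAS AND PROOFS =====

-- the value A's loop appends after acc: w1, w2, ..., or wk
def prettyMid : List String → String
  | [] => ""
  | [w] => "or " ++ w
  | w :: rest => w ++ ", " ++ prettyMid rest

lemma loop_eq_mid (n : Nat) : ∀ (l : List String) (i : Nat) (acc : String),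
    l ≠ [] → i + l.length = n → prettyOrListLoop n i l acc = acc ++ prettyMid l := by
  intro l
  induction l with
  | nil => intro i acc h; exact absurd rfl h
  | cons w rest ih =>
    intro i acc _ hn
    cases rest with
    | nil =>
      have : i = n - 1 := by simp at hn; omega
      simp [prettyOrListLoop, this, prettyMid]
    | cons x rest' =>
      have hne : i ≠ n - 1 := by simp at hn; omega
      have hstep : prettyOrListLoop n i (w :: x :: rest') acc
          = prettyOrListLoop n (i + 1) (x :: rest') (acc ++ (w ++ ", ")) := by
        simp [prettyOrListLoop, hne]
      rw [hstep, ih (i + 1) (acc ++ (w ++ ", ")) (by simp) (by simp at hn ⊢; omega)]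
      have hm : prettyMid (w :: x :: rest') = w ++ ", " ++ prettyMid (x :: rest') := rfl
      rw [hm]
      simp [String.append_assoc]

lemma foldr_eq_mid : ∀ (l : List String) (h : l ≠ []),
    l.dropLast.foldr (fun word out => word ++ ", " ++ out) ("or " ++ l.getLast h) = prettyMid l := by
  intro l
  induction l with
  | nil => intro h; exact absurd rfl h
  | cons w rest ih =>
    intro _
    cases rest with
    | nil => simp [prettyMid]
    | cons x rest' =>
      have h1 : (w :: x :: rest').dropLast = w :: (x :: rest').dropLast := rfl
      rw [h1, List.foldr_cons,
          show ((w :: x :: rest').getLast (by simp)) = ((x :: rest').getLast (by simp)) from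
            List.getLast_cons _,
          ih (by simp)]
      rfl

lemma pyGet?_neg_one_getLast : ∀ (rest : List String) (a : String),
    (PySem.List.pyGet? (a :: rest) (-1)).getD "" = (a :: rest).getLast (by simp) := by
  intro rest a
  have h : PySem.List.pyGet? (a :: rest) (-1) = some ((a :: rest).getLast (by simp)) := by
    simp [PySem.List.pyGet?, PySem.List.pyIdx?]
    rw [List.getLast_eq_getElem]
    simp
    rfl
  rw [h]; rfl

theorem prettyOrList_spec_aux : ∀ (l : List String), prettyOrList l = prettyOrList_alt l := by
  intro l
  match l with
  | [] => rfl
  | [a] => simp [prettyOrList, prettyOrList_alt]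
  | [a, b] => simp [prettyOrList, prettyOrList_alt]
  | a :: b :: c :: rest =>
    have h0 : (a :: b :: c :: rest).length ≠ 0 := by simp
    have h1 : (a :: b :: c :: rest).length ≠ 1 := by simp
    have h2 : (a :: b :: c :: rest).length ≠ 2 := by simp
    unfold prettyOrList prettyOrList_alt
    rw [if_neg h0, if_neg h1, if_neg h2, if_neg h0, if_neg h1, if_neg h2]
    rw [loop_eq_mid _ _ 0 "" (by simp) (by simp),
        PySem.List.slice_to_neg_one, List.foldl_reverse,
        pyGet?_neg_one_getLast (b :: c :: rest) a,
        foldr_eq_mid (a :: b :: c :: rest) (by simp)]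
    simp
  
-- ===== VERDICT (by name: the statement is the Claim_ definition above) =====
theorem prettyOrList_spec : Claim_equal_prettyOrList := by
  intro l _
  exact prettyOrList_spec_aux l
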